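-- pv_equiv track=rewrite | github.com/SufZen/RealizeOS-5 | realize_core/base_handler.py | select_agent
-- ===== SOURCE A (Python) =====
-- def select_agent(agent_routing: dict, message: str, default: str = "orchestrator") -> str:
--     """Select the best agent based on keyword scoring."""
--     msg_lower = message.lower()
--     scores = {}
--     for agent, keywords in agent_routing.items():
--         score = sum(1 for kw in keywords if kw in msg_lower)
--         if score > 0:
--             scores[agent] = score
--     if not scores:
--         return default
--     return max(scores, key=scores.get)
-- ===== SOURCE B (Python) =====
-- def select_agent(agent_routing: dict, message: str, default: str = "orchestrator") -> str:
--     """Select the best agent by ranking: sort (score, agent) pairs by descending score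
--     (stable, so the first-inserted agent wins ties) and take the top entry if positive."""
--     msg_lower = message.lower()
--     ranked = sorted(
--         ((sum(1 for kw in kws if kw in msg_lower), agent)
--          for agent, kws in agent_routing.items()),
--         key=lambda t: t[0],
--         reverse=True,
--     )
--     if ranked and ranked[0][0] > 0:
--         return ranked[0][1]
--     return default
-- ===== Notes on version B (the rewrite author's own statement) =====
-- stated objective: alternative
-- what changed: Replaces the positive-scores dict plus max(scores, key=scores.get) selection with a rank-by-sorting strategy: build (score, agent) pairs, stable-sort them by descending score, and return the top agent if its score is positive (stability preserves the first-encountered tie-break).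
import Mathlib
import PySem

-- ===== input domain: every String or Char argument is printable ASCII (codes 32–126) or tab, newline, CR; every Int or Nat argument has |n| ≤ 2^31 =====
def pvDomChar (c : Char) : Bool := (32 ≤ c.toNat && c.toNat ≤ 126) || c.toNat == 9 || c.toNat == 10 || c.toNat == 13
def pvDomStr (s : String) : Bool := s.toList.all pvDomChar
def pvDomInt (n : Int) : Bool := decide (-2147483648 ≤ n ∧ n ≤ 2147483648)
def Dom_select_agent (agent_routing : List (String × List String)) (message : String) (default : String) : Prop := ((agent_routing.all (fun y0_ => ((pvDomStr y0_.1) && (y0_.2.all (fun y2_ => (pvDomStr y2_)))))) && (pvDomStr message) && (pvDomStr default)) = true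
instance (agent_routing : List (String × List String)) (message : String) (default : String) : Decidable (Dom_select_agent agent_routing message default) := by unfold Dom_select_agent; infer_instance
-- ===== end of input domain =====

-- B replaces A's positive-scores dict + max(scores, key=scores.get) by rank-by-sorting: stable
-- reverse sort of (score, agent) pairs by score, take the top agent if its score is positive.

-- ===== PORT A =====
def select_agent (agent_routing : List (String × List String)) (message : String) (default : String) : String :=
  let msg_lower := PySem.Str.lower message
  let scores : PySem.Dict String Int :=
    agent_routing.foldl (fun scores p =>
      let score : Int := p.2.foldl (fun acc kw => if PySem.Str.isIn kw msg_lower then acc + 1 else acc) 0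
      if score > 0 then scores.insert p.1 score else scores) PySem.Dict.empty
  if scores.items = [] then default
  else
    -- max(scores, key=scores.get): first key of maximal score; every key is in scores, so
    -- scores.get(k) is its score and getD k 0 is exact.
    (PySem.List.max? scores.keys (fun k => scores.getD k 0)).getD default

-- ===== PORT B =====
def select_agent_alt (agent_routing : List (String × List String)) (message : String) (default : String) : String :=
  let msg_lower := PySem.Str.lower message
  let ranked :=
    PySem.List.sorted
      (agent_routing.map (fun p =>
        (p.2.foldl (fun acc kw => if PySem.Str.isIn kw msg_lower then acc + 1 else acc) (0 : Int), p.1)))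
      (fun t => t.1) true
  match ranked with
  | [] => default
  | r :: _ => if r.1 > 0 then r.2 else default

-- ===== PRECONDITION & SPEC =====
-- Pre_ excludes association lists with duplicate agent names: the Python argument is a dict, whose
-- keys are necessarily distinct, so such lists correspond to no Python input (there A's
-- overwrite-in-place and B's pair list could differ).
def Pre_select_agent (agent_routing : List (String × List String)) (message : String) (default : String) : Prop :=
  (agent_routing.map Prod.fst).Nodup

instance (agent_routing : List (String × List String)) (message : String) (default : String) : Decidable (Pre_select_agent agent_routing message default) := by unfold Pre_select_agent; infer_instance

def pvWitness_select_agent : (List (String × List String)) × String × String :=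
  ([("math", ["sum", "count"]), ("chat", ["hello"])], "please Sum this", "orchestrator")

def Spec_select_agent (agent_routing : List (String × List String)) (message : String) (default : String) (out : String) : Prop := out = select_agent_alt agent_routing message default
instance (agent_routing : List (String × List String)) (message : String) (default : String) (out : String) : Decidable (Spec_select_agent agent_routing message default out) := by unfold Spec_select_agent; infer_instance

-- ===== CLAIM (what is proved, stated in full; the proofs are below) =====
def Claim_equal_select_agent : Prop := ∀ (agent_routing : List (String × List String)) (message : String) (default : String), Dom_select_agent agent_routing message default → Pre_select_agent agent_routing message default → Spec_select_agent agent_routing message default (select_agent agent_routing message default)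

-- ===== LEMMAS AND PROOFS =====

-- the shared inner loop: score of one agent's keyword list against msg_lower
def pvSc (ml : String) (p : String × List String) : Int :=
  p.2.foldl (fun acc kw => if PySem.Str.isIn kw ml then acc + 1 else acc) 0

def pvF (ml : String) (p : String × List String) : String × Int := (p.1, pvSc ml p)

-- step of A's max pass over (agent, score) pairs, and of B's sort-head over (score, agent) pairs
def pvStepA (b r : String × Int) : String × Int := if r.2 > b.2 then r else b
def pvStepB (c x : Int × String) : Int × String := if c.1 < x.1 then x else c
def pvSwap (p : String × Int) : Int × String := (p.2, p.1)

-- A's dict-building loop appends exactly the positively-scored agents, in order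
theorem pvA_items (ml : String) (ar : List (String × List String)) (d : PySem.Dict String Int)
    (hfresh : ∀ p ∈ ar, d.contains p.1 = false) (hnd : (ar.map Prod.fst).Nodup) :
    (ar.foldl (fun d p => if pvSc ml p > 0 then d.insert p.1 (pvSc ml p) else d) d).items
      = d.items ++ (ar.filter (fun p => pvSc ml p > 0)).map (pvF ml) := by
  induction ar generalizing d with
  | nil => simp
  | cons p t ih =>
    have hnd1 : p.1 ∉ t.map Prod.fst := (List.nodup_cons.mp hnd).1
    have hnd' : (t.map Prod.fst).Nodup := (List.nodup_cons.mp hnd).2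
    by_cases h : pvSc ml p > 0
    · have hfp : d.contains p.1 = false := hfresh p (List.mem_cons_self)
      have hfresh' : ∀ q ∈ t, (d.insert p.1 (pvSc ml p)).contains q.1 = false := by
        intro q hq
        rw [PySem.Dict.contains_insert]
        have hne : q.1 ≠ p.1 := by
          intro e
          exact hnd1 (e ▸ List.mem_map_of_mem hq)
        simp [hne, hfresh q (List.mem_cons_of_mem _ hq)]
      simp only [List.foldl_cons, if_pos h]
      rw [ih _ hfresh' hnd', PySem.Dict.items_insert_of_not_contains _ _ hfp]
      simp [h, pvF]
    · simp only [List.foldl_cons, if_neg h]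
      rw [ih _ (fun q hq => hfresh q (List.mem_cons_of_mem _ hq)) hnd']
      simp [h]

-- the two fold step functions of A's max(...) pass, on keys and on (key, score) pairs
def pvOStep (g : String → Int) (a : Option String) (x : String) : Option String :=
  match a with
  | none => some x
  | some m => if g m < g x then some x else some m

def pvPStep (a : Option (String × Int)) (q : String × Int) : Option (String × Int) :=
  match a with
  | none => some q
  | some m => if m.2 < q.2 then some q else some m

-- max? IS the fold of its step function
theorem pvMaxEq (g : String → Int) (xs : List String) :
    PySem.List.max? xs g = xs.foldl (pvOStep g) none := by
  unfold PySem.List.max?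
  congr 1
  funext a x
  cases a <;> rfl

-- once the max?-fold holds `some m`, it is the strict-update fold
theorem pvLock (l : List (String × Int)) (m : String × Int) :
    l.foldl pvPStep (some m) = some (l.foldl pvStepA m) := by
  induction l generalizing m with
  | nil => rfl
  | cons q t ih =>
    simp only [List.foldl_cons]
    by_cases h : m.2 < q.2
    · have h1 : pvPStep (some m) q = some q := by simp [pvPStep, h]
      have h2 : pvStepA m q = q := by simp [pvStepA, gt_iff_lt, h]
      rw [h1, h2]
      exact ih q
    · have h1 : pvPStep (some m) q = some m := by simp [pvPStep, h]
      have h2 : pvStepA m q = m := by simp [pvStepA, gt_iff_lt, h]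
      rw [h1, h2]
      exact ih m

-- max? over the key list with a key-consistent score function is max? over the pairs
theorem pvMaxMap (g : String → Int) (l : List (String × Int)) (acc : Option (String × Int))
    (hg : ∀ q ∈ l, g q.1 = q.2) (hacc : ∀ q, acc = some q → g q.1 = q.2) :
    (l.map Prod.fst).foldl (pvOStep g) (acc.map Prod.fst)
      = (l.foldl pvPStep acc).map Prod.fst := by
  induction l generalizing acc with
  | nil => rfl
  | cons q t ih =>
    have hgq : g q.1 = q.2 := hg q (List.mem_cons_self)
    have hg' : ∀ r ∈ t, g r.1 = r.2 := fun r hr => hg r (List.mem_cons_of_mem _ hr)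
    match acc with
    | none =>
      simp only [Option.map_none, List.map_cons, List.foldl_cons, pvOStep, pvPStep]
      exact ih (some q) hg' (by intro r hr; cases hr; exact hgq)
    | some m =>
      have hgm : g m.1 = m.2 := hacc m rfl
      simp only [Option.map_some, List.map_cons, List.foldl_cons, pvOStep, pvPStep, hgq, hgm]
      by_cases h : m.2 < q.2
      · simp only [if_pos h]
        exact ih (some q) hg' (by intro r hr; cases hr; exact hgq)
      · simp only [if_neg h]
        exact ih (some m) hg' (by intro r hr; cases hr; exact hgm)

-- A, with msg_lower abstracted, in terms of the positively-scored pair list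
theorem pvA_form (ar : List (String × List String)) (ml dflt : String)
    (hpre : (ar.map Prod.fst).Nodup) :
    (if (ar.foldl (fun d p => if pvSc ml p > 0 then d.insert p.1 (pvSc ml p) else d)
          PySem.Dict.empty).items = [] then dflt
     else (PySem.List.max?
        (ar.foldl (fun d p => if pvSc ml p > 0 then d.insert p.1 (pvSc ml p) else d)
          PySem.Dict.empty).keys
        (fun k => (ar.foldl (fun d p => if pvSc ml p > 0 then d.insert p.1 (pvSc ml p) else d)
          PySem.Dict.empty).getD k 0)).getD dflt)
      = (match (ar.filter (fun p => pvSc ml p > 0)).map (pvF ml) with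
         | [] => dflt
         | q :: t => (t.foldl pvStepA q).1) := by
  set scores := ar.foldl (fun d p => if pvSc ml p > 0 then d.insert p.1 (pvSc ml p) else d)
    PySem.Dict.empty with hsc
  set M := (ar.filter (fun p => pvSc ml p > 0)).map (pvF ml) with hM
  have hI : scores.items = M := by
    have := pvA_items ml ar PySem.Dict.empty
      (fun p _ => PySem.Dict.contains_empty p.1) hpre
    simpa [PySem.Dict.empty] using this
  have hndM : (M.map Prod.fst).Nodup := by
    have hKfst : M.map Prod.fst = (ar.filter (fun p => pvSc ml p > 0)).map Prod.fst := by
      simp [hM, List.map_map, pvF]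
    rw [hKfst]
    exact (List.Sublist.map Prod.fst List.filter_sublist).nodup hpre
  have hkeys : scores.keys = M.map Prod.fst := by
    simp [PySem.Dict.keys, hI]
  have hg : ∀ r ∈ M, scores.getD r.1 0 = r.2 := by
    intro r hr
    have h1 : scores.get? r.1 = some r.2 := by
      refine PySem.Dict.get?_of_mem_items scores ?_ ?_
      · rw [hI]; exact (Prod.mk.eta ▸ hr)
      · rw [hkeys]; exact hndM
    exact PySem.Dict.getD_of_get?_eq_some scores 0 h1
  clear_value M scores
  clear hM hsc
  cases M with
  | nil => rw [hI]; simp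
  | cons q t =>
    rw [hI, if_neg (List.cons_ne_nil q t)]
    have hmax : PySem.List.max? scores.keys (fun k => scores.getD k 0)
        = some ((t.foldl pvStepA q).1) := by
      have h1 := pvMaxMap (fun k => scores.getD k 0) (q :: t) none hg (by intro r hr; cases hr)
      simp only [Option.map_none] at h1
      rw [hkeys, pvMaxEq, h1, List.foldl_cons]
      show (t.foldl pvPStep (some q)).map Prod.fst = _
      rw [pvLock]
      rfl
    rw [hmax]
    rfl

-- head of the reverse insertion-sort fold on a nonempty accumulator is the running strict max
theorem pvInsHead (l : List (Int × String)) :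
    ∀ (h : Int × String) (t : List (Int × String)),
      (l.foldl (fun acc x =>
          PySem.List.insertBy (fun a b => decide ((fun t => t.1) b < (fun t => t.1) a)) x acc)
        (h :: t)).head? = some (l.foldl pvStepB h) := by
  induction l with
  | nil => intro h t; rfl
  | cons x l' ih =>
    intro h t
    simp only [List.foldl_cons, PySem.List.insertBy]
    by_cases hcmp : h.1 < x.1
    · rw [if_pos (by simpa using hcmp)]
      rw [ih x (h :: t)]
      simp [pvStepB, hcmp]
    · rw [if_neg (by simpa using hcmp)]
      rw [ih h _]
      simp [pvStepB, hcmp]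

-- the running strict max never decreases the score component
theorem pvMono (l : List (Int × String)) :
    ∀ q0 : Int × String, q0.1 ≤ (l.foldl pvStepB q0).1 := by
  induction l with
  | nil => intro q0; exact le_refl _
  | cons x t ih =>
    intro q0
    have h1 : q0.1 ≤ (pvStepB q0 x).1 := by
      unfold pvStepB
      split_ifs with h
      · omega
      · exact le_refl _
    exact le_trans h1 (ih (pvStepB q0 x))

-- with a nonnegative current best, nonpositive-score pairs never win
theorem pvSkip (l : List (Int × String)) :
    ∀ b : Int × String, 0 ≤ b.1 →
      l.foldl pvStepB b = (l.filter (fun q => decide (0 < q.1))).foldl pvStepB b := by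
  induction l with
  | nil => intro b _; rfl
  | cons q t ih =>
    intro b hb
    by_cases h : 0 < q.1
    · have hb' : (0:Int) ≤ (pvStepB b q).1 := by
        unfold pvStepB; split_ifs with h2
        · omega
        · exact hb
      have hf : (q :: t).filter (fun q => decide (0 < q.1)) = q :: t.filter (fun q => decide (0 < q.1)) := by
        simp [h]
      rw [hf, List.foldl_cons, List.foldl_cons]
      exact ih _ hb'
    · have h2 : pvStepB b q = b := by
        unfold pvStepB; rw [if_neg (by omega)]
      have hf : (q :: t).filter (fun q => decide (0 < q.1)) = t.filter (fun q => decide (0 < q.1)) := by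
        simp [h]
      rw [hf, List.foldl_cons, h2]
      exact ih _ hb

-- first-max over the whole pair list + positivity test = first-max over the positive pairs
theorem pvBridge (dflt : String) :
    ∀ (t : List (Int × String)) (q0 : Int × String),
      (match (q0 :: t).filter (fun x => decide (0 < x.1)) with
       | [] => dflt
       | q :: t' => (t'.foldl pvStepB q).2)
      = (if 0 < (t.foldl pvStepB q0).1 then (t.foldl pvStepB q0).2 else dflt) := by
  intro t
  induction t with
  | nil =>
    intro q0
    by_cases h : 0 < q0.1 <;> simp [h]
  | cons x t' ih =>
    intro q0
    by_cases hq0 : 0 < q0.1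
    · have hf : (q0 :: x :: t').filter (fun x => decide (0 < x.1))
          = q0 :: (x :: t').filter (fun x => decide (0 < x.1)) := by simp [hq0]
      have hpos : 0 < ((x :: t').foldl pvStepB q0).1 := lt_of_lt_of_le hq0 (pvMono _ q0)
      rw [hf, if_pos hpos]
      show (((x :: t').filter (fun q => decide (0 < q.1))).foldl pvStepB q0).2 = _
      rw [← pvSkip (x :: t') q0 (le_of_lt hq0)]
    · have hf : (q0 :: x :: t').filter (fun x => decide (0 < x.1))
          = (x :: t').filter (fun x => decide (0 < x.1)) := by simp [hq0]
      rw [hf]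
      by_cases hx : q0.1 < x.1
      · have hs : pvStepB q0 x = x := by unfold pvStepB; rw [if_pos hx]
        have := ih x
        rw [List.foldl_cons, hs]
        exact this
      · have hs : pvStepB q0 x = q0 := by unfold pvStepB; rw [if_neg hx]
        have hxle : ¬ 0 < x.1 := by
          simp only [not_lt] at hq0 hx ⊢
          omega
        have hf2 : (x :: t').filter (fun x => decide (0 < x.1))
            = (q0 :: t').filter (fun x => decide (0 < x.1)) := by simp [hxle, hq0]
        rw [hf2, List.foldl_cons, hs]
        exact ih q0

-- swapping pair components conjugates A's max step into B's
theorem pvSwapFold (l : List (String × Int)) :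
    ∀ b : String × Int, (l.map pvSwap).foldl pvStepB (pvSwap b) = pvSwap (l.foldl pvStepA b) := by
  induction l with
  | nil => intro b; rfl
  | cons r t ih =>
    intro b
    have hstep : pvStepB (pvSwap b) (pvSwap r) = pvSwap (pvStepA b r) := by
      unfold pvStepA pvStepB pvSwap
      simp only [gt_iff_lt]
      split_ifs <;> rfl
    simp only [List.map_cons, List.foldl_cons, hstep]
    exact ih (pvStepA b r)

-- A's match over (agent, score) pairs rephrased over the swapped, filtered pair list
theorem pvMswap (ar : List (String × List String)) (ml dflt : String) :
    (match (ar.filter (fun p => pvSc ml p > 0)).map (pvF ml) with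
     | [] => dflt
     | q :: t => (t.foldl pvStepA q).1)
    = (match (ar.map (fun p => (pvSc ml p, p.1))).filter (fun x => decide (0 < x.1)) with
       | [] => dflt
       | q :: t' => (t'.foldl pvStepB q).2) := by
  have hSM : (ar.map (fun p => (pvSc ml p, p.1))).filter (fun x => decide (0 < x.1))
      = ((ar.filter (fun p => pvSc ml p > 0)).map (pvF ml)).map pvSwap := by
    rw [List.filter_map, List.map_map]
    rfl
  rw [hSM]
  generalize (ar.filter (fun p => pvSc ml p > 0)).map (pvF ml) = M
  cases M with
  | nil => rfl
  | cons q t =>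
    simp only [List.map_cons]
    show (t.foldl pvStepA q).1 = ((t.map pvSwap).foldl pvStepB (pvSwap q)).2
    rw [pvSwapFold t q]
    rfl

-- first-max of the positive pairs = head of the stable reverse sort, positivity-tested
theorem pvGen (S : List (Int × String)) (dflt : String) :
    (match S.filter (fun x => decide (0 < x.1)) with
     | [] => dflt
     | q :: t' => (t'.foldl pvStepB q).2)
    = (match PySem.List.sorted S (fun t => t.1) true with
       | [] => dflt
       | r :: _ => if r.1 > 0 then r.2 else dflt) := by
  cases S with
  | nil => rfl
  | cons q0 t0 =>
    have hsorted : (PySem.List.sorted (q0 :: t0) (fun t => t.1) true).head?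
        = some (t0.foldl pvStepB q0) := by
      rw [PySem.List.sorted_rev_eq_foldl_insertBy, List.foldl_cons]
      show ((t0.foldl (fun acc x =>
          PySem.List.insertBy (fun a b => decide ((fun t => t.1) b < (fun t => t.1) a)) x acc)
        [q0])).head? = _
      exact pvInsHead t0 q0 []
    cases hcase : PySem.List.sorted (q0 :: t0) (fun t => t.1) true with
    | nil =>
      exact absurd ((PySem.List.sorted_eq_nil_iff (q0 :: t0) (fun t => t.1) true).mp hcase)
        (List.cons_ne_nil q0 t0)
    | cons m rest =>
      rw [hcase] at hsorted
      have hm : m = t0.foldl pvStepB q0 := Option.some.inj hsorted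
      rw [pvBridge dflt t0 q0, hm]

-- ===== VERDICT (by name: the statement is the Claim_ definition above) =====
theorem select_agent_spec : Claim_equal_select_agent := by
  intro ar message dflt _ hpre
  unfold Spec_select_agent
  have hpre' : (ar.map Prod.fst).Nodup := hpre
  generalize hml : PySem.Str.lower message = ml
  have hA : select_agent ar message dflt
      = (if (ar.foldl (fun d p => if pvSc ml p > 0 then d.insert p.1 (pvSc ml p) else d)
              PySem.Dict.empty).items = [] then dflt
         else (PySem.List.max?
            (ar.foldl (fun d p => if pvSc ml p > 0 then d.insert p.1 (pvSc ml p) else d)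
              PySem.Dict.empty).keys
            (fun k => (ar.foldl (fun d p => if pvSc ml p > 0 then d.insert p.1 (pvSc ml p) else d)
              PySem.Dict.empty).getD k 0)).getD dflt) := by
    rw [← hml]
    rfl
  have hB : select_agent_alt ar message dflt
      = (match PySem.List.sorted (ar.map (fun p => (pvSc ml p, p.1))) (fun t => t.1) true with
         | [] => dflt
         | r :: _ => if r.1 > 0 then r.2 else dflt) := by
    rw [← hml]
    rfl
  rw [hA, hB, pvA_form ar ml dflt hpre', pvMswap ar ml dflt, pvGen]
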